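-- pv_equiv track=rewrite | github.com/flambuth/transcript_scraper | script_analysis.py | sum_names_in_wordlist
-- ===== SOURCE A (Python) =====
-- from collections import Counter
--
-- def sum_names_in_wordlist(
--         persons_of_interest,
--         word_list):
--     '''
--     Using the persons_of_interest dict to find all variants of each series character's
--     name.
--     Word_list should be a list of single words.
--         Can be used on an episode, season, or entire series. THis accepts a
--         list of strings and counts the 'persons_of_interest' occurences in those
--         strings
--     '''
--     word_counts = Counter(word_list)
--     summed_counts = {}
--
--     for key, word_list in persons_of_interest.items():
--         total_count = sum(word_counts[word] for word in word_list if word in word_counts)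
--         summed_counts[key] = total_count
--     return summed_counts
-- ===== SOURCE B (Python) =====
-- def sum_names_in_wordlist(
--         persons_of_interest,
--         word_list):
--     # Reverse index: variant word -> list of person keys claiming it
--     # (a list, so a variant listed twice for a key counts twice).
--     index = {}
--     for key, variants in persons_of_interest.items():
--         for w in variants:
--             index.setdefault(w, []).append(key)
--     summed_counts = {key: 0 for key in persons_of_interest}
--     for word in word_list:
--         for key in index.get(word, ()):
--             summed_counts[key] += 1
--     return summed_counts
-- ===== Notes on version B (the rewrite author's own statement) =====
-- stated objective: alternative
-- what changed: Replaces A's Counter-over-word_list plus per-person sum of counter lookups by a reverse index (variant word -> list of person keys) and a single counting pass over word_list that increments the pre-seeded per-person totals.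
import Mathlib
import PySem

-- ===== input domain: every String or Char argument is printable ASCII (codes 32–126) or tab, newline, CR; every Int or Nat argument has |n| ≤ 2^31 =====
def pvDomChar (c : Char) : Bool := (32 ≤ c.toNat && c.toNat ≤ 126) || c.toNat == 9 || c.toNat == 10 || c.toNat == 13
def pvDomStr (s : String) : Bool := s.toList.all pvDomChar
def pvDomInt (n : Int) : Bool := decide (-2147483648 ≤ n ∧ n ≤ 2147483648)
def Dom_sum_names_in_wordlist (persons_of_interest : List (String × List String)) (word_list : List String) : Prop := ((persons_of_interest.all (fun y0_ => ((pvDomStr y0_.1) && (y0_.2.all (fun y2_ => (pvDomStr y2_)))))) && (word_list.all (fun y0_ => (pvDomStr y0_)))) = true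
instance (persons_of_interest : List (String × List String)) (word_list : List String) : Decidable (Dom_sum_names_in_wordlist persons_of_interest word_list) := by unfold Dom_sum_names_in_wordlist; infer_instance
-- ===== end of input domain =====

-- B replaces A's per-person Counter lookups by a reverse index word→keys and one
-- counting pass over word_list; same cost class, different decomposition (objective: alternative).

-- ===== PORT A =====
def sum_names_in_wordlist (persons_of_interest : List (String × List String)) (word_list : List String) : List (String × Int) :=
  let word_counts : PySem.Dict String Int := PySem.Dict.counter word_list
  let summed_counts : PySem.Dict String Int :=
    persons_of_interest.foldl (fun d kv =>
      d.insert kv.1 (kv.2.foldl (fun s w =>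
        if word_counts.contains w then s + word_counts.getD w 0 else s) 0)) PySem.Dict.empty
  summed_counts.items

-- ===== PORT B =====
def sum_names_in_wordlist_alt (persons_of_interest : List (String × List String)) (word_list : List String) : List (String × Int) :=
  let index : PySem.Dict String (List String) :=
    persons_of_interest.foldl (fun d kv =>
      kv.2.foldl (fun d w => d.modify w [] (fun l => l ++ [kv.1])) d) PySem.Dict.empty
  let summed_counts : PySem.Dict String Int :=
    persons_of_interest.foldl (fun d kv => d.insert kv.1 0) PySem.Dict.empty
  let final : PySem.Dict String Int :=
    word_list.foldl (fun d word =>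
      (index.getD word []).foldl (fun d key => d.modify key 0 (fun n => n + 1)) d) summed_counts
  final.items

-- ===== PRECONDITION & SPEC =====
-- persons_of_interest is a Python dict, whose keys are necessarily distinct; the association-list
-- model also admits duplicate keys, which no Python call can produce — Pre_ excludes only those.
def Pre_sum_names_in_wordlist (persons_of_interest : List (String × List String)) (word_list : List String) : Prop :=
  (persons_of_interest.map Prod.fst).Nodup
instance (persons_of_interest : List (String × List String)) (word_list : List String) : Decidable (Pre_sum_names_in_wordlist persons_of_interest word_list) := by unfold Pre_sum_names_in_wordlist; infer_instance
def pvWitness_sum_names_in_wordlist : (List (String × List String)) × List String :=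
  ([("tony", ["tony", "anthony"]), ("paulie", ["paulie"])], ["so", "tony", "paulie", "tony"])
def Spec_sum_names_in_wordlist (persons_of_interest : List (String × List String)) (word_list : List String) (out : List (String × Int)) : Prop := out = sum_names_in_wordlist_alt persons_of_interest word_list
instance (persons_of_interest : List (String × List String)) (word_list : List String) (out : List (String × Int)) : Decidable (Spec_sum_names_in_wordlist persons_of_interest word_list out) := by unfold Spec_sum_names_in_wordlist; infer_instance

-- ===== CLAIM (what is proved, stated in full; the proofs are below) =====
def Claim_equal_sum_names_in_wordlist : Prop := ∀ (persons_of_interest : List (String × List String)) (word_list : List String), Dom_sum_names_in_wordlist persons_of_interest word_list → Pre_sum_names_in_wordlist persons_of_interest word_list → Spec_sum_names_in_wordlist persons_of_interest word_list (sum_names_in_wordlist persons_of_interest word_list)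

-- ===== LEMMAS AND PROOFS =====

-- the word→(key multiset) pairs B's index is built from, flattened
def pvPairs (poi : List (String × List String)) : List (String × String) :=
  poi.flatMap (fun kv => kv.2.map (fun w => (w, kv.1)))

theorem pv_ite_sum_count (ys : List String) (a : String) :
    (ys.map (fun y => if y = a then 1 else 0)).sum = ys.count a := by
  induction ys with
  | nil => simp
  | cons b t ih => by_cases h : b = a <;> simp [ih, h] <;> omega

-- double counting: Σ_{x∈xs} count x ys = Σ_{y∈ys} count y xs
theorem pv_count_swap (xs ys : List String) : (xs.map ys.count).sum = (ys.map xs.count).sum := by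
  induction xs generalizing ys with
  | nil => simp [List.count_nil]
  | cons a t ih =>
    have h1 : (ys.map (fun y => (a::t).count y)).sum
        = (ys.map (fun y => t.count y)).sum + (ys.map (fun y => if y = a then 1 else 0)).sum := by
      rw [← List.sum_map_add]
      refine congrArg List.sum (List.map_congr_left (fun y _ => ?_))
      rw [List.count_cons]
      by_cases h : y = a
      · simp [h]
      · simp [h]; exact fun hh => h hh.symm
    simp only [List.map_cons, List.sum_cons, h1, pv_ite_sum_count, ih]
    omega

theorem pv_count_flatMap (l : List String) (g : String → List String) (x : String) :
    (l.flatMap g).count x = (l.map (fun y => (g y).count x)).sum := by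
  induction l with
  | nil => simp
  | cons a t ih => simp [List.flatMap_cons, List.count_append, ih]

-- A's inner generator sum equals the total count of kv's variants in word_list
theorem pv_a_inner (wl ws : List String) (acc : Int) :
    ws.foldl (fun s w =>
        if (PySem.Dict.counter wl).contains w then s + (PySem.Dict.counter wl).getD w 0 else s) acc
      = acc + ((ws.map (fun w => wl.count w)).sum : Nat) := by
  induction ws generalizing acc with
  | nil => simp
  | cons w t ih =>
    rw [List.foldl_cons, ih]
    rw [PySem.Dict.contains_counter, PySem.Dict.getD_counter]
    by_cases h : wl.contains w
    · simp only [h, if_pos, List.map_cons, List.sum_cons]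
      push_cast; ring
    · have hc : wl.count w = 0 := by
        simp only [List.contains_eq_mem] at h
        exact List.count_eq_zero.mpr (by simpa using h)
      simp [hc]

-- keys with multiplicity of pvPairs, per target key: under Nodup keys it is kv's own variant count
theorem pv_pairs_countP_zero (poi : List (String × List String)) (word k : String)
    (hk : k ∉ poi.map Prod.fst) :
    (pvPairs poi).countP (fun p => p.1 == word && p.2 == k) = 0 := by
  induction poi with
  | nil => simp [pvPairs]
  | cons a t ih =>
    simp only [List.map_cons, List.mem_cons, not_or] at hk
    simp only [pvPairs, List.flatMap_cons, List.countP_append] at *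
    have h1 : (a.2.map (fun w => (w, a.1))).countP (fun p => p.1 == word && p.2 == k) = 0 := by
      rw [List.countP_map]
      refine List.countP_eq_zero.mpr (fun w _ => ?_)
      simp [Ne.symm hk.1]
    simp [h1, ih hk.2]

theorem pv_pairs_countP (poi : List (String × List String)) (word : String)
    (hnd : (poi.map Prod.fst).Nodup) (kv : String × List String) (hm : kv ∈ poi) :
    (pvPairs poi).countP (fun p => p.1 == word && p.2 == kv.1) = kv.2.count word := by
  induction poi with
  | nil => simp at hm
  | cons a t ih =>
    simp only [List.map_cons, List.nodup_cons] at hnd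
    rcases List.mem_cons.mp hm with h | h
    · subst h
      have h2 := pv_pairs_countP_zero t word kv.1 hnd.1
      simp only [pvPairs, List.flatMap_cons, List.countP_append] at h2 ⊢
      rw [h2, List.countP_map]
      have h1 : List.countP ((fun p => p.1 == word && p.2 == kv.1) ∘ fun w => (w, kv.1)) kv.2
          = kv.2.count word := by
        rw [List.count_eq_countP]
        exact List.countP_congr (fun w _ => by simp)
      omega
    · have hne : a.1 ≠ kv.1 := by
        intro he
        exact hnd.1 (he ▸ List.mem_map_of_mem h)
      have h3 := ih hnd.2 h
      simp only [pvPairs, List.flatMap_cons, List.countP_append] at h3 ⊢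
      rw [List.countP_map]
      have h1 : List.countP ((fun p => p.1 == word && p.2 == kv.1) ∘ fun w => (w, a.1)) a.2 = 0 :=
        List.countP_eq_zero.mpr (fun w _ => by simp [hne])
      omega

-- B's flattened increment stream: one key token per (word occurrence, matching variant) pair
theorem pv_ops_count (poi : List (String × List String)) (wl : List String)
    (hnd : (poi.map Prod.fst).Nodup) (kv : String × List String) (hm : kv ∈ poi) :
    (wl.flatMap (fun word => ((pvPairs poi).filter (fun p => p.1 == word)).map (fun p => p.2))).count kv.1
      = (kv.2.map wl.count).sum := by
  rw [pv_count_flatMap]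
  have hw : ∀ word, (((pvPairs poi).filter (fun p => p.1 == word)).map (fun p => p.2)).count kv.1
      = kv.2.count word := by
    intro word
    rw [List.count_eq_countP, List.countP_map, List.countP_filter]
    rw [← pv_pairs_countP poi word hnd kv hm]
    exact List.countP_congr (fun p _ => by simp [Bool.and_comm])
  calc (wl.map (fun word => (((pvPairs poi).filter (fun p => p.1 == word)).map (fun p => p.2)).count kv.1)).sum
      = (wl.map (fun word => kv.2.count word)).sum := by
        exact congrArg List.sum (List.map_congr_left (fun word _ => hw word))
    _ = (kv.2.map wl.count).sum := (pv_count_swap kv.2 wl).symm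

theorem sum_names_in_wordlist_spec : Claim_equal_sum_names_in_wordlist := by
  intro poi wl _ hpre
  unfold Pre_sum_names_in_wordlist at hpre
  unfold Spec_sum_names_in_wordlist sum_names_in_wordlist sum_names_in_wordlist_alt

  -- A side: a fold of inserts at the distinct keys of poi, starting from the empty dict
  have hA : (poi.foldl (fun d kv =>
        d.insert kv.1 (kv.2.foldl (fun s w =>
          if (PySem.Dict.counter wl).contains w then s + (PySem.Dict.counter wl).getD w 0 else s) 0))
        PySem.Dict.empty).items
      = poi.map (fun kv => (kv.1, (((kv.2.map wl.count).sum : Nat) : Int))) := by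
    rw [PySem.Dict.items_foldl_insert_fresh poi Prod.fst _ PySem.Dict.empty
      (fun a _ => PySem.Dict.contains_empty _) hpre]
    rw [show (PySem.Dict.empty : PySem.Dict String Int).items = [] from rfl, List.nil_append]
    exact List.map_congr_left (fun kv _ => by rw [pv_a_inner wl kv.2 0, zero_add])
  -- B side
  set index : PySem.Dict String (List String) :=
    poi.foldl (fun d kv => kv.2.foldl (fun d w => d.modify w [] (fun l => l ++ [kv.1])) d)
      PySem.Dict.empty with hindex
  have hidx : index = (pvPairs poi).foldl (fun d p => d.modify p.1 [] (fun l => l ++ [p.2]))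
      PySem.Dict.empty := by
    rw [hindex, pvPairs, List.foldl_flatMap]
    exact List.foldl_ext _ _ _ (fun d kv _ =>
      (List.foldl_map (f := fun w => (w, kv.1))
        (g := fun (d : PySem.Dict String (List String)) (p : String × String) =>
          d.modify p.1 [] (fun l => l ++ [p.2]))).symm)
  have hget : ∀ word, index.getD word []
      = ((pvPairs poi).filter (fun p => p.1 == word)).map (fun p => p.2) := by
    intro word
    rw [hidx, PySem.Dict.getD_foldl_modify_append, PySem.Dict.getD_empty, List.nil_append]
  set seeded : PySem.Dict String Int := poi.foldl (fun d kv => d.insert kv.1 0) PySem.Dict.empty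
    with hseeded
  have hseed_items : seeded.items = poi.map (fun kv => (kv.1, (0 : Int))) := by
    rw [hseeded, PySem.Dict.items_foldl_insert_fresh poi Prod.fst (fun _ => (0 : Int))
      PySem.Dict.empty (fun a _ => PySem.Dict.contains_empty _) hpre]
    rw [show (PySem.Dict.empty : PySem.Dict String Int).items = [] from rfl, List.nil_append]
  have hseed_keys : seeded.keys = poi.map Prod.fst := by
    simp only [PySem.Dict.keys, hseed_items, List.map_map]
    rfl
  -- flatten B's counting pass
  set ops : List String := wl.flatMap (fun word => index.getD word []) with hops
  have hfin : wl.foldl (fun d word =>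
        (index.getD word []).foldl (fun d key => d.modify key 0 (fun n => n + 1)) d) seeded
      = ops.foldl (fun d key => d.modify key 0 (fun n => n + 1)) seeded := by
    rw [hops, List.foldl_flatMap]
  have hops_mem : ∀ x ∈ ops, x ∈ poi.map Prod.fst := by
    intro x hx
    rw [hops] at hx
    rcases List.mem_flatMap.mp hx with ⟨word, _, hxw⟩
    rw [hget word] at hxw
    rcases List.mem_map.mp hxw with ⟨p, hp, hpx⟩
    rcases List.mem_flatMap.mp (List.mem_of_mem_filter hp) with ⟨kv, hkv, hpkv⟩
    rcases List.mem_map.mp hpkv with ⟨w, _, hw⟩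
    rw [← hpx, ← hw]
    exact List.mem_map_of_mem hkv
  have hkeys : (ops.foldl (fun d key => d.modify key 0 (fun n => n + 1)) seeded).keys
      = poi.map Prod.fst := by
    rw [PySem.Dict.keys_foldl_modify ops 0 (fun _ _ => (fun n => n + 1)) seeded,
      PySem.Set.update_eq_append_filter, hseed_keys]
    have : (PySem.Set.ofList ops).filter
        (fun y => !PySem.Set.contains (poi.map Prod.fst) y) = [] := by
      refine List.filter_eq_nil_iff.mpr (fun y hy => ?_)
      have := hops_mem y ((PySem.Set.mem_ofList ops y).mp hy)
      simp [this]
    rw [this, List.append_nil]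
  have hnd2 : (ops.foldl (fun d key => d.modify key 0 (fun n => n + 1)) seeded).keys.Nodup := by
    rw [hkeys]; exact hpre
  have hvals : ∀ kv ∈ poi,
      (ops.foldl (fun d key => d.modify key 0 (fun n => n + 1)) seeded).getD kv.1 0
        = (((kv.2.map wl.count).sum : Nat) : Int) := by
    intro kv hkv
    rw [PySem.Dict.getD_foldl_modify_add_one ops seeded kv.1]
    have hz : seeded.getD kv.1 0 = 0 := by
      refine PySem.Dict.getD_of_mem_items seeded ?_ (hseed_keys ▸ hpre) 0
      rw [hseed_items]
      exact List.mem_map.mpr ⟨kv, hkv, rfl⟩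
    have hcnt : ops.count kv.1 = (kv.2.map wl.count).sum := by
      rw [hops]
      have : wl.flatMap (fun word => index.getD word [])
          = wl.flatMap (fun word => ((pvPairs poi).filter (fun p => p.1 == word)).map (fun p => p.2)) :=
        List.flatMap_congr (fun word _ => hget word)
      rw [this]
      exact pv_ops_count poi wl hpre kv hkv
    rw [hz, hcnt, zero_add]
  have hB : (wl.foldl (fun d word =>
        (index.getD word []).foldl (fun d key => d.modify key 0 (fun n => n + 1)) d) seeded).items
      = poi.map (fun kv => (kv.1, (((kv.2.map wl.count).sum : Nat) : Int))) := by
    rw [hfin, PySem.Dict.items_eq_map_keys _ hnd2 0, hkeys, List.map_map]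
    refine List.map_congr_left (fun kv hkv => ?_)
    simp only [Function.comp_apply]
    rw [hvals kv hkv]
  rw [hA, hB]
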